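/- GENERATED by farm/mkstatement.py from design/units.tsv (unit `digest_extensions.E`) and the assertions of Gif/Spec/Seg_digest_extensions.lean — do not edit.
   THE STATEMENT of the proof unit `digest_extensions.E`: segment E of `digest_extensions` (9 instructions; entries 0x1056f0;
   exits ret; ranges 0x1056f0-0x105702)
   takes each of its entry assertions to one of its exit assertions (`Gif.Spec.digest_extensions.SegE`), given the contracts of its callees.
   What the names mean: ProgX/Base/Spec/Basic.lean (the shared hypotheses), Gif/Spec/Seg_digest_extensions.lean (the assertions). The theorem to prove:
   `theorem digest_extensions_E_ok : Gif.Spec.digest_extensions_E.Statement`. -/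
import Gif.Code
import Gif.Dec.All
import Gif.Labels
import Gif.Spec.Seg_digest_extensions
namespace Gif.Spec.digest_extensions_E
open X86 X86.User Asan

/-- The statement of unit `digest_extensions.E`. -/
def Statement : Prop :=
  ∀ (Lay : Layout) (_hLay : Lay.hi = 0x1000000) (μ : Microarch) (_hμ : UserX.MicroOK μ) (u₀ : State)
    (_hcode : HasCodeNat Lay u₀ Gif.L.digest_extensions.entry Gif.Code.code_digest_extensions.nat Gif.L.digest_extensions.size),
    Gif.Spec.digest_extensions.SegE Lay μ u₀

end Gif.Spec.digest_extensions_E
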